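-- pv_equiv track=rewrite | github.com/arecker/blog | src/pagination.py | paginate_list
-- ===== SOURCE A (Python) =====
-- import collections
--
-- Pagination = collections.namedtuple('Pagination', ['next', 'previous'])
--
-- def paginate_list(things):
--     """Returns a pagination map for a list of things.
--
--     >>> pages = paginate_list(['a', 'b', 'c'])
--     >>> pages['a'].previous is None
--     True
--     >>> pages['a'].next
--     'b'
--     >>> pages['c'].previous
--     'b'
--     >>> pages['c'].next is None
--     True
--     """
--
--     pagination = {}
--
--     for i, thing in enumerate(things):
--         if i > 0:
--             previous_thing = things[i - 1]
--         else:
--             previous_thing = None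
--
--         try:
--             next_thing = things[i + 1]
--         except IndexError:
--             next_thing = None
--
--         pagination[thing] = Pagination(next_thing, previous_thing)
--
--     return pagination
-- ===== SOURCE B (Python) =====
-- import collections
--
-- Pagination = collections.namedtuple('Pagination', ['next', 'previous'])
--
-- def paginate_list(things):
--     it = iter(things)
--     try:
--         cur = next(it)
--     except StopIteration:
--         return {}
--     pagination = {}
--     prev = None
--     for nxt in it:
--         pagination[cur] = Pagination(nxt, prev)
--         prev, cur = cur, nxt
--     pagination[cur] = Pagination(None, prev)
--     return pagination
-- ===== Notes on version B (the rewrite author's own statement) =====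
-- stated objective: idiomatic
-- what changed: B consumes the input as an iterator with a sliding (prev, cur) window, peeling off the first element and emitting the final boundary entry after the loop, instead of A's per-index random access with index arithmetic and try/except IndexError.
import Mathlib
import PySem

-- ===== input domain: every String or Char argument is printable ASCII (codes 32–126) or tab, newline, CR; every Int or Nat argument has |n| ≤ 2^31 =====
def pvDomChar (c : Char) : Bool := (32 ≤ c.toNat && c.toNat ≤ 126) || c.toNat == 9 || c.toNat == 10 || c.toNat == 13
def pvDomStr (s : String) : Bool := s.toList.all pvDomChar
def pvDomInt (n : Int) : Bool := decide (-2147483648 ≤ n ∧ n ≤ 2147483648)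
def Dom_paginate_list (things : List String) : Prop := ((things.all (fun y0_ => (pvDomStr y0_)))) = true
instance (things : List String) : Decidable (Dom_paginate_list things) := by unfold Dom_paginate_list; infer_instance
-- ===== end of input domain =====

-- B streams the list through an iterator with a sliding (prev, cur) window (first element peeled off, final boundary entry emitted after the loop), replacing A's per-index random access and try/except IndexError; same cost, more idiomatic.


-- ===== PORT A =====
def paginate_list (things : List String) : List (String × Option String × Option String) :=
  ((PySem.List.enumerate things 0).foldl (fun d it =>
      let previous_thing : Option String :=
        if it.1 > 0 then PySem.List.pyGet? things (it.1 - 1) else none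
      let next_thing : Option String := PySem.List.pyGet? things (it.1 + 1)
      d.insert it.2 (next_thing, previous_thing)) PySem.Dict.empty).items

-- ===== PORT B =====
-- B's loop: sliding (prev, cur) window over the remaining elements, inserting the boundary entry at the end
def pvGoB (d : PySem.Dict String (Option String × Option String)) (prev : Option String)
    (cur : String) : List String → PySem.Dict String (Option String × Option String)
  | [] => d.insert cur (none, prev)
  | nxt :: rest => pvGoB (d.insert cur (some nxt, prev)) (some cur) nxt rest

def paginate_list_alt (things : List String) : List (String × Option String × Option String) :=
  match things with
  | [] => []  -- empty iterator: return {}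
  | cur :: rest => (pvGoB PySem.Dict.empty none cur rest).items

-- ===== PRECONDITION & SPEC =====
def Spec_paginate_list (things : List String) (out : List (String × Option String × Option String)) : Prop := out = paginate_list_alt things
instance (things : List String) (out : List (String × Option String × Option String)) : Decidable (Spec_paginate_list things out) := by unfold Spec_paginate_list; infer_instance

-- ===== CLAIM (what is proved, stated in full; the proofs are below) =====
def Claim_equal_paginate_list : Prop := ∀ (things : List String), Dom_paginate_list things → Spec_paginate_list things (paginate_list things)

-- ===== LEMMAS AND PROOFS =====

-- the (thing, next, previous) triples A inserts, as a zip of shifted lists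
lemma pair_lists_eq (things : List String) :
    (PySem.List.enumerate things 0).map (fun it =>
      (it.2, (PySem.List.pyGet? things (it.1 + 1),
              if it.1 > 0 then PySem.List.pyGet? things (it.1 - 1) else none))) =
    things.zip ((things.tail.map some ++ [none]).zip (none :: (things.dropLast.map some))) := by
  apply List.ext_getElem
  · simp [PySem.List.length_enumerate]
    omega
  · intro i h1 h2
    simp only [List.getElem_map, PySem.List.getElem_enumerate, List.getElem_zip]
    have hn : i < things.length := by
      simpa [PySem.List.length_enumerate] using h1
    have hl1 : i < (List.map some things.tail ++ [none]).length := by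
      simp [List.length_tail]; omega
    have hl2 : i < (none :: List.map some things.dropLast).length := by
      simp; omega
    refine Prod.ext ?_ (Prod.ext ?_ ?_)
    · rfl
    · -- next component
      show PySem.List.pyGet? things ((0 : Int) + ↑i + 1) =
        (things.tail.map some ++ [none])[i]'hl1
      have : ((0 : Int) + ↑i + 1) = ((i + 1 : Nat) : Int) := by push_cast; ring
      rw [this, PySem.List.pyGet?_natCast]
      by_cases h : i + 1 < things.length
      · rw [List.getElem?_eq_getElem h,
          List.getElem_append_left (by simp [List.length_tail]; omega)]
        simp [List.getElem_tail]
      · have hi : i = things.length - 1 := by omega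
        rw [List.getElem?_eq_none (by omega),
          List.getElem_append_right (by simp [List.length_tail]; omega)]
        simp
    · -- previous component
      show (if (0 : Int) + ↑i > 0 then PySem.List.pyGet? things ((0 : Int) + ↑i - 1) else none) =
        (none :: things.dropLast.map some)[i]'hl2
      rcases Nat.eq_zero_or_pos i with hz | hp
      · subst hz; simp
      · have hgt : (0 : Int) + ↑i > 0 := by omega
        rw [if_pos hgt]
        have : ((0 : Int) + ↑i - 1) = ((i - 1 : Nat) : Int) := by omega
        rw [this, PySem.List.pyGet?_natCast,
          List.getElem?_eq_getElem (by omega)]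
        rcases i with _ | j
        · omega
        · simp [List.getElem_dropLast]

-- the triples B's sliding window produces, as a pure list
def pairsB (prev : Option String) : List String → List (String × Option String × Option String)
  | [] => []
  | c :: rest =>
      (c, (match rest with | [] => none | n :: _ => some n), prev) :: pairsB (some c) rest

lemma pvGoB_eq_foldl (rest : List String) :
    ∀ (d : PySem.Dict String (Option String × Option String)) (prev : Option String) (cur : String),
    pvGoB d prev cur rest = (pairsB prev (cur :: rest)).foldl (fun d p => d.insert p.1 p.2) d := by
  induction rest with
  | nil => intro d prev cur; simp [pvGoB, pairsB]
  | cons nxt rest ih =>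
      intro d prev cur
      simp only [pvGoB, pairsB, List.foldl_cons]
      exact ih _ _ _

lemma pairsB_eq_zip (xs : List String) :
    ∀ (prev : Option String),
    pairsB prev xs = xs.zip ((xs.tail.map some ++ [none]).zip (prev :: xs.dropLast.map some)) := by
  induction xs with
  | nil => intro prev; simp [pairsB]
  | cons c rest ih =>
      intro prev
      cases rest with
      | nil => simp [pairsB]
      | cons n rest' =>
          rw [show pairsB prev (c :: n :: rest') =
              (c, some n, prev) :: pairsB (some c) (n :: rest') from rfl, ih (some c)]
          simp [List.dropLast_cons_of_ne_nil]

-- ===== VERDICT (by name: the statement is the Claim_ definition above) =====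
theorem paginate_list_spec : Claim_equal_paginate_list := by
  intro things _
  show paginate_list things = paginate_list_alt things
  cases things with
  | nil => rfl
  | cons cur rest =>
      unfold paginate_list
      rw [show paginate_list_alt (cur :: rest) = (pvGoB PySem.Dict.empty none cur rest).items
        from rfl]
      rw [pvGoB_eq_foldl, pairsB_eq_zip]
      rw [show ((PySem.List.enumerate (cur :: rest) 0).foldl (fun d it =>
          let previous_thing : Option String :=
            if it.1 > 0 then PySem.List.pyGet? (cur :: rest) (it.1 - 1) else none
          let next_thing : Option String := PySem.List.pyGet? (cur :: rest) (it.1 + 1)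
          d.insert it.2 (next_thing, previous_thing)) PySem.Dict.empty) =
        ((PySem.List.enumerate (cur :: rest) 0).map (fun it =>
          (it.2, (PySem.List.pyGet? (cur :: rest) (it.1 + 1),
                  if it.1 > 0 then PySem.List.pyGet? (cur :: rest) (it.1 - 1) else none)))).foldl
          (fun d p => d.insert p.1 p.2) PySem.Dict.empty
        from by rw [List.foldl_map]]
      rw [pair_lists_eq]
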